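-- pv_equiv track=rewrite | github.com/deshpr/Music_Recommender_System | collaborative_filtering.py | song_no
-- ===== SOURCE A (Python) =====
-- def song_no(song_id):
-- 	sid={}
-- 	j=0
-- 	for i in song_id:
-- 		if i not in sid:
-- 			sid.update({i:j})
-- 			j=j+1
-- 	return sid
-- ===== SOURCE B (Python) =====
-- def song_no(song_id):
--     # Stage 1: single reverse pass; overwriting leaves each element's FIRST position.
--     first = {}
--     for p, v in reversed(list(enumerate(song_id))):
--         first[v] = p
--     # Stage 2: sort the distinct elements by first position, then index positionally.
--     order = sorted(first, key=first.get)
--     return {v: k for k, v in enumerate(order)}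
-- ===== Notes on version B (the rewrite author's own statement) =====
-- stated objective: alternative
-- what changed: A's single forward pass with a membership-guarded dict and an explicit counter is replaced by a sort-based pipeline: one reverse overwrite pass records each element's first-occurrence position (no membership test, no counter), the distinct elements are then sorted by that position, and a final enumerate stage assigns the indices.
import Mathlib
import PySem

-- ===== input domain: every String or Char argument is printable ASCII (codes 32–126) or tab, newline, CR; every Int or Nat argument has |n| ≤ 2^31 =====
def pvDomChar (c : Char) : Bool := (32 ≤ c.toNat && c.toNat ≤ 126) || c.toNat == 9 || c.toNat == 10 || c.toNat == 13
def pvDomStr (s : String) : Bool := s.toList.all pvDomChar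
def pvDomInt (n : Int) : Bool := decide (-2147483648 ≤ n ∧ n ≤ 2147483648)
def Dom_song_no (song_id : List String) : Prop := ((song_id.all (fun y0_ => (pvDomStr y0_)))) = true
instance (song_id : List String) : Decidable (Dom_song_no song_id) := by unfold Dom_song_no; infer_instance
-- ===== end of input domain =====

-- B replaces A's membership-guard-plus-counter pass by a reverse overwrite pass recording
-- first-occurrence positions, a sort by that position, and a positional indexing stage (alternative; similar cost).

-- ===== PORT A =====
-- A: one pass, dict 'sid' plus counter 'j'; insert-and-increment when the key is new.
def song_no (song_id : List String) : List (String × Int) :=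
  (song_id.foldl
    (fun (st : PySem.Dict String Int × Int) i =>
      if st.1.contains i = false then (st.1.insert i st.2, st.2 + 1) else st)
    (PySem.Dict.empty, 0)).1.items

-- ===== PORT B =====
-- B: reverse pass 'first[v] = p' over reversed(list(enumerate(song_id))); then
-- sorted(first, key=first.get) — every key is in 'first', so first.get is exactly getD _ 0 here;
-- then {v: k for k, v in enumerate(order)}.
def song_no_alt (song_id : List String) : List (String × Int) :=
  let first := ((PySem.List.enumerate song_id 0).reverse).foldl
      (fun (d : PySem.Dict String Int) pv => d.insert pv.2 pv.1) PySem.Dict.empty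
  let order := PySem.List.sorted first.keys (fun k => first.getD k 0) false
  (PySem.List.enumerate order 0).map (fun p => (p.2, p.1))

-- ===== PRECONDITION & SPEC =====
def Spec_song_no (song_id : List String) (out : List (String × Int)) : Prop := out = song_no_alt song_id
instance (song_id : List String) (out : List (String × Int)) : Decidable (Spec_song_no song_id out) := by unfold Spec_song_no; infer_instance

-- ===== CLAIM (what is proved, stated in full; the proofs are below) =====
def Claim_equal_song_no : Prop := ∀ (song_id : List String), Dom_song_no song_id → Spec_song_no song_id (song_no song_id)

-- ===== LEMMAS AND PROOFS =====

-- First occurrences of l not already in 'seen', in order (the order A emits).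
def pvFirsts (seen : List String) : List String → List String
  | [] => []
  | head :: tail =>
    if head ∈ seen then pvFirsts seen tail
    else head :: pvFirsts (seen ++ [head]) tail

-- A's loop, characterised against pvFirsts.
theorem pvLoop (l : List String) : ∀ (d : PySem.Dict String Int) (j : Int),
    (l.foldl
      (fun (st : PySem.Dict String Int × Int) i =>
        if st.1.contains i = false then (st.1.insert i st.2, st.2 + 1) else st)
      (d, j)).1.items
    = d.items ++ (PySem.List.enumerate (pvFirsts d.keys l) j).map (fun p => (p.2, p.1)) := by
  induction l with
  | nil => intro d j; simp [pvFirsts, PySem.List.enumerate_nil]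
  | cons x xs ih =>
    intro d j
    by_cases h : x ∈ d.keys
    · have hc : d.contains x = true := (PySem.Dict.contains_iff_mem_keys d x).mpr h
      simp only [List.foldl_cons, hc, Bool.true_eq_false, if_false]
      rw [ih d j]
      simp [pvFirsts, h]
    · have hc : d.contains x = false := by
        cases hcc : d.contains x with
        | false => rfl
        | true => exact absurd ((PySem.Dict.contains_iff_mem_keys d x).mp hcc) h
      simp only [List.foldl_cons, hc, if_true]
      have hkeys : (d.insert x j).keys = d.keys ++ [x] :=
        PySem.Dict.keys_insert_of_not_contains d j hc
      rw [ih (d.insert x j) (j + 1)]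
      rw [PySem.Dict.items_insert_of_not_contains d j hc, hkeys]
      simp [pvFirsts, h, PySem.List.enumerate_cons]

-- First-occurrence position of k in l, offset by s (s itself if k ∉ l).
def pvFIdx : List String → Int → String → Int
  | [], s, _ => s
  | x :: xs, s, k => if k = x then s else pvFIdx xs (s + 1) k

theorem pvFIdx_ge (l : List String) : ∀ (s : Int) (k : String), s ≤ pvFIdx l s k := by
  induction l with
  | nil => intro s k; simp [pvFIdx]
  | cons x xs ih =>
    intro s k
    simp only [pvFIdx]
    split
    · exact le_refl s
    · exact le_trans (by omega) (ih (s + 1) k)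

-- B's reverse-overwrite loop: get? is the LAST insert for the key, i.e. the first find in ps.reverse.
theorem pvGetFold (ps : List (Int × String)) : ∀ (d : PySem.Dict String Int) (k : String),
    (ps.foldl (fun (d : PySem.Dict String Int) pv => d.insert pv.2 pv.1) d).get? k
    = match ps.reverse.find? (fun pv => pv.2 == k) with
      | some pv => some pv.1
      | none => d.get? k := by
  induction ps with
  | nil => intro d k; simp
  | cons p ps ih =>
    intro d k
    simp only [List.foldl_cons, List.reverse_cons]
    rw [ih, List.find?_append]
    cases hf : ps.reverse.find? (fun pv => pv.2 == k) with
    | some q => simp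
    | none =>
      by_cases hk : p.2 = k
      · subst hk; simp
      · have hk2 : ¬ k = p.2 := fun e => hk e.symm
        simp [hk, hk2, PySem.Dict.get?_insert]

theorem pvFindEnum (l : List String) : ∀ (s : Int) (k : String), k ∈ l →
    (PySem.List.enumerate l s).find? (fun pv => pv.2 == k) = some (pvFIdx l s k, k) := by
  induction l with
  | nil => intro s k h; simp at h
  | cons x xs ih =>
    intro s k hk
    rw [PySem.List.enumerate_cons]
    by_cases h : k = x
    · subst h; simp [pvFIdx]
    · have hx : (x == k) = false := beq_eq_false_iff_ne.mpr (Ne.symm h)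
      have hk' : k ∈ xs := by cases hk with
        | head => exact absurd rfl h
        | tail _ h2 => exact h2
      simp only [List.find?_cons, hx, pvFIdx, if_neg h]
      exact ih (s + 1) k hk'

theorem pvFirsts_mem (l : List String) : ∀ (seen : List String) (a : String),
    a ∈ pvFirsts seen l ↔ (a ∈ l ∧ a ∉ seen) := by
  induction l with
  | nil => intro seen a; simp [pvFirsts]
  | cons x xs ih =>
    intro seen a
    by_cases h : x ∈ seen
    · simp only [pvFirsts, if_pos h, ih]
      constructor
      · rintro ⟨h1, h2⟩; exact ⟨List.mem_cons_of_mem _ h1, h2⟩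
      · rintro ⟨h1, h2⟩
        cases h1 with
        | head => exact absurd h h2
        | tail _ h3 => exact ⟨h3, h2⟩
    · simp only [pvFirsts, if_neg h, List.mem_cons, ih]
      constructor
      · rintro (rfl | ⟨h1, h2⟩)
        · exact ⟨Or.inl rfl, h⟩
        · exact ⟨Or.inr h1, fun hs => h2 (List.mem_append_left _ hs)⟩
      · rintro ⟨(rfl | h1), h2⟩
        · exact Or.inl rfl
        · by_cases hax : a = x
          · exact Or.inl hax
          · exact Or.inr ⟨h1, fun hs => by
              rcases List.mem_append.mp hs with hs | hs
              · exact h2 hs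
              · simp at hs; exact hax hs⟩

theorem pvFirsts_nodup (l : List String) : ∀ (seen : List String), (pvFirsts seen l).Nodup := by
  induction l with
  | nil => intro seen; simp [pvFirsts]
  | cons x xs ih =>
    intro seen
    by_cases h : x ∈ seen
    · simpa [pvFirsts, h] using ih seen
    · simp only [pvFirsts, if_neg h, List.nodup_cons]
      refine ⟨fun hx => ?_, ih (seen ++ [x])⟩
      have := ((pvFirsts_mem xs (seen ++ [x]) x).mp hx).2
      exact this (List.mem_append_right _ (by simp))

theorem pvFirsts_pairwise (l : List String) : ∀ (s : Int) (seen : List String),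
    (pvFirsts seen l).Pairwise (fun a b => pvFIdx l s a < pvFIdx l s b) := by
  induction l with
  | nil => intro s seen; simp [pvFirsts]
  | cons x xs ih =>
    intro s seen
    by_cases h : x ∈ seen
    · simp only [pvFirsts, if_pos h]
      refine (ih (s + 1) seen).imp_of_mem ?_
      intro a b ha hb hab
      have hax : a ≠ x := fun e => ((pvFirsts_mem xs seen a).mp ha).2 (e ▸ h)
      have hbx : b ≠ x := fun e => ((pvFirsts_mem xs seen b).mp hb).2 (e ▸ h)
      simpa [pvFIdx, if_neg hax, if_neg hbx] using hab
    · simp only [pvFirsts, if_neg h, List.pairwise_cons]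
      constructor
      · intro b hb
        have hbx : b ≠ x := fun e =>
          ((pvFirsts_mem xs (seen ++ [x]) b).mp hb).2 (e ▸ List.mem_append_right _ (by simp))
        have := pvFIdx_ge xs (s + 1) b
        have e1 : pvFIdx (x :: xs) s x = s := by simp [pvFIdx]
        have e2 : pvFIdx (x :: xs) s b = pvFIdx xs (s + 1) b := by simp [pvFIdx, hbx]
        rw [e1, e2]
        omega
      · refine (ih (s + 1) (seen ++ [x])).imp_of_mem ?_
        intro a b ha hb hab
        have hax : a ≠ x := fun e =>
          ((pvFirsts_mem xs (seen ++ [x]) a).mp ha).2 (e ▸ List.mem_append_right _ (by simp))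
        have hbx : b ≠ x := fun e =>
          ((pvFirsts_mem xs (seen ++ [x]) b).mp hb).2 (e ▸ List.mem_append_right _ (by simp))
        simpa [pvFIdx, if_neg hax, if_neg hbx] using hab

-- Abbreviation for B's dict (proof-local).
def pvFirstDict (l : List String) : PySem.Dict String Int :=
  ((PySem.List.enumerate l 0).reverse).foldl
    (fun (d : PySem.Dict String Int) pv => d.insert pv.2 pv.1) PySem.Dict.empty

theorem pvFirstDict_get? (l : List String) (k : String) (hk : k ∈ l) :
    (pvFirstDict l).get? k = some (pvFIdx l 0 k) := by
  unfold pvFirstDict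
  rw [pvGetFold, List.reverse_reverse, pvFindEnum l 0 k hk]

theorem pvFirstDict_get?_none (l : List String) (k : String) (hk : k ∉ l) :
    (pvFirstDict l).get? k = none := by
  unfold pvFirstDict
  rw [pvGetFold, List.reverse_reverse]
  have : (PySem.List.enumerate l 0).find? (fun pv => pv.2 == k) = none := by
    rw [List.find?_eq_none]
    intro p hp
    rcases (PySem.List.mem_enumerate_iff _ _ _).mp hp with ⟨i, hi, rfl⟩
    simp only [Bool.not_eq_true, beq_eq_false_iff_ne]
    intro e
    exact hk (e ▸ l.getElem_mem hi)
  simp [this, PySem.Dict.get?_empty]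

theorem pvFirstDict_mem_keys (l : List String) (k : String) :
    k ∈ (pvFirstDict l).keys ↔ k ∈ l := by
  constructor
  · intro h
    by_contra hk
    have := pvFirstDict_get?_none l k hk
    exact ((PySem.Dict.get?_eq_none_iff_not_mem_keys _ _).mp this) h
  · intro hk
    by_contra h
    have := (PySem.Dict.get?_eq_none_iff_not_mem_keys _ _).mpr h
    rw [pvFirstDict_get? l k hk] at this
    exact Option.some_ne_none _ this

theorem pvFirstDict_nodup_keys (l : List String) : (pvFirstDict l).keys.Nodup :=
  PySem.Dict.nodup_keys_foldl_insert_key ((PySem.List.enumerate l 0).reverse)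
    (fun (pv : Int × String) => pv.2) (fun _ (pv : Int × String) => pv.1)
    PySem.Dict.empty PySem.Dict.nodup_keys_empty

-- The sorted order IS the first-occurrence order A emits.
theorem pvSortedEq (l : List String) :
    PySem.List.sorted (pvFirstDict l).keys (fun k => (pvFirstDict l).getD k 0) false
    = pvFirsts [] l := by
  apply PySem.List.sorted_eq_of_perm_of_pairwise_lt
  · exact (List.perm_ext_iff_of_nodup (pvFirsts_nodup l []) (pvFirstDict_nodup_keys l)).mpr
      (fun a => by simp [pvFirsts_mem, pvFirstDict_mem_keys])
  · refine (pvFirsts_pairwise l 0 []).imp_of_mem ?_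
    intro a b ha hb hab
    have hal : a ∈ l := ((pvFirsts_mem l [] a).mp ha).1
    have hbl : b ∈ l := ((pvFirsts_mem l [] b).mp hb).1
    rw [PySem.Dict.getD_eq_get?_getD, PySem.Dict.getD_eq_get?_getD,
      pvFirstDict_get? l a hal, pvFirstDict_get? l b hbl]
    exact hab

-- ===== VERDICT (by name: the statement is the Claim_ definition above) =====
theorem song_no_spec : Claim_equal_song_no := by
  intro song_id _
  show song_no song_id = song_no_alt song_id
  unfold song_no song_no_alt
  rw [pvLoop song_id PySem.Dict.empty 0]
  show _ = (PySem.List.enumerate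
      (PySem.List.sorted (pvFirstDict song_id).keys
        (fun k => (pvFirstDict song_id).getD k 0) false) 0).map (fun p => (p.2, p.1))
  rw [pvSortedEq]
  simp [PySem.Dict.empty]
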